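-- pv_equiv track=rewrite | github.com/itztt23/Group-Work | Group_Assignment_3/Main.py | findClosestSumToZero
-- ===== SOURCE A (Python) =====
-- import math
--
-- def findClosestSumToZero(A, low, high, k):
--     find = -1 * k
--     if high - low == 1:
--         if abs(A[low] + k) > abs(A[high] + k):
--             return A[high]
--         else:
--             return A[low]
--     if high - low == 0:
--         return A[high]
--     else:
--         mid = int(math.floor((high + low)/2))
--         if A[mid] == find:
--             return A[mid]
--         elif A[mid] < find:
--             return findClosestSumToZero(A, mid, high, k)
--         elif A[mid] > find:
--             return findClosestSumToZero(A, low, mid, k)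
-- ===== SOURCE B (Python) =====
-- def findClosestSumToZero(A, low, high, k):
--     find = -k
--     if high - low == 0:
--         return A[high]
--     while high - low > 1:
--         mid = (high + low) // 2
--         if A[mid] == find:
--             return A[mid]
--         elif A[mid] < find:
--             low = mid
--         else:
--             high = mid
--     return A[high] if abs(A[low] + k) > abs(A[high] + k) else A[low]
-- ===== Notes on version B (the rewrite author's own statement) =====
-- stated objective: alternative
-- what changed: Replaced the recursive binary search by an iterative while-loop that narrows [low,high] in place, with the two-element comparison moved to a single post-loop return.
-- outside the precondition, e.g. on findClosestSumToZero([1, 2, 3], 2, 0, -5): A returns 1, B returns 3; on findClosestSumToZero([1], 0, 5, 0): A raises IndexError, B raises IndexError; on findClosestSumToZero([1, 1], 1, 0, 0): A does not finish within the time limit, B returns 1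
import Mathlib
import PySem

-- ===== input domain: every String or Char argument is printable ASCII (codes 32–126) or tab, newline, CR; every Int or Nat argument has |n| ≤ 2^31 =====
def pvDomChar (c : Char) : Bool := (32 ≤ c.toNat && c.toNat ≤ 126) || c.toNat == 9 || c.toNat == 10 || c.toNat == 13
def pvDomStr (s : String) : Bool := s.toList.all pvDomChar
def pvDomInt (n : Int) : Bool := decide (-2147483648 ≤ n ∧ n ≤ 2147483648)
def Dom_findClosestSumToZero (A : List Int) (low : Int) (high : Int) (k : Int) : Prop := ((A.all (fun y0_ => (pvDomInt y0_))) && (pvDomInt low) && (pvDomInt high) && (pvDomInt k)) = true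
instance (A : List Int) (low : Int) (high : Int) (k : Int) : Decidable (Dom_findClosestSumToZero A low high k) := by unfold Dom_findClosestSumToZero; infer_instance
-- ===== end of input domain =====

-- B replaces A's recursive binary search by an iterative in-place loop (same cost; constant auxiliary space instead of recursion).


-- ===== PORT A =====
-- A's recursion, with fuel making it total in Lean (inside Pre_ the fuel (high-low).natAbs+1
-- strictly exceeds the recursion depth, so it never runs out there).
-- math.floor((high+low)/2) is exact as PySem.Int.floordiv on Dom (|values| ≤ 2^31, exact in float).
def findClosestSumToZeroGo (fuel : Nat) (A : List Int) (low : Int) (high : Int) (k : Int) : Int :=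
  match fuel with
  | 0 => 0
  | f + 1 =>
    let find := -1 * k
    if high - low = 1 then
      match PySem.List.pyGet? A low, PySem.List.pyGet? A high with
      | some al, some ah => if |al + k| > |ah + k| then ah else al
      | _, _ => 0          -- IndexError: excluded by Pre_
    else if high - low = 0 then (PySem.List.pyGet? A high).getD 0
    else
      let mid := PySem.Int.floordiv (high + low) 2
      match PySem.List.pyGet? A mid with
      | some am =>
        if am = find then am
        else if am < find then findClosestSumToZeroGo f A mid high k
        else findClosestSumToZeroGo f A low mid k
      | none => 0          -- IndexError: excluded by Pre_

def findClosestSumToZero (A : List Int) (low : Int) (high : Int) (k : Int) : Int :=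
  findClosestSumToZeroGo ((high - low).natAbs + 1) A low high k

-- ===== PORT B =====
-- B's while-loop as a tail recursion on the narrowing state (low, high); the fuel (high-low).toNat+1
-- only makes it total for Lean and never runs out (the loop body only runs while high-low > 1 and
-- strictly shrinks high-low), so this computes exactly what Source B's loop computes on every input.
def findClosestSumToZeroLoop (fuel : Nat) (A : List Int) (low : Int) (high : Int) (k : Int) (find : Int) : Int :=
  match fuel with
  | 0 => 0               -- unreachable with the fuel findClosestSumToZero_alt supplies
  | f + 1 =>
    if 1 < high - low then
      let mid := PySem.Int.floordiv (high + low) 2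
      match PySem.List.pyGet? A mid with
      | some am =>
        if am = find then am
        else if am < find then findClosestSumToZeroLoop f A mid high k find
        else findClosestSumToZeroLoop f A low mid k find
      | none => 0        -- IndexError: excluded by Pre_
    else
      match PySem.List.pyGet? A low, PySem.List.pyGet? A high with
      | some al, some ah => if |al + k| > |ah + k| then ah else al
      | _, _ => 0        -- IndexError: excluded by Pre_

def findClosestSumToZero_alt (A : List Int) (low : Int) (high : Int) (k : Int) : Int :=
  let find := -k
  if high - low = 0 then (PySem.List.pyGet? A high).getD 0
  else findClosestSumToZeroLoop ((high - low).toNat + 1) A low high k find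

-- ===== PRECONDITION & SPEC =====
-- Pre_ excludes inverted ranges (high < low), on which A may recurse forever or return an accidental
-- value of its degenerate recursion, and out-of-range endpoints (low < -len(A) or high ≥ len(A)), on
-- which A raises IndexError; Python's negative-index wraparound is inside Pre_ and matched.
def Pre_findClosestSumToZero (A : List Int) (low : Int) (high : Int) (k : Int) : Prop :=
  low ≤ high ∧ -(A.length : Int) ≤ low ∧ high < A.length
instance (A : List Int) (low : Int) (high : Int) (k : Int) : Decidable (Pre_findClosestSumToZero A low high k) := by unfold Pre_findClosestSumToZero; infer_instance

def pvWitness_findClosestSumToZero : List Int × Int × Int × Int := ([-5, -2, 1, 4, 9], 0, 4, 3)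

def Spec_findClosestSumToZero (A : List Int) (low : Int) (high : Int) (k : Int) (out : Int) : Prop := out = findClosestSumToZero_alt A low high k
instance (A : List Int) (low : Int) (high : Int) (k : Int) (out : Int) : Decidable (Spec_findClosestSumToZero A low high k out) := by unfold Spec_findClosestSumToZero; infer_instance

-- ===== CLAIM (what is proved, stated in full; the proofs are below) =====
def Claim_equal_findClosestSumToZero : Prop := ∀ (A : List Int) (low : Int) (high : Int) (k : Int), Dom_findClosestSumToZero A low high k → Pre_findClosestSumToZero A low high k → Spec_findClosestSumToZero A low high k (findClosestSumToZero A low high k)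

-- ===== LEMMAS AND PROOFS =====

-- main invariant: with the same fuel, A's recursion and B's loop coincide on any in-range
-- interval of positive width (both consume one unit of fuel per halving step)
theorem go_eq_loop (fuel : Nat) : ∀ (A : List Int) (low high k : Int),
    low + 1 ≤ high → (high - low).toNat < fuel →
    findClosestSumToZeroGo fuel A low high k = findClosestSumToZeroLoop fuel A low high k (-k) := by
  induction fuel with
  | zero => intro A low high k _ hf; omega
  | succ f ih =>
    intro A low high k hlh hf
    rw [findClosestSumToZeroGo, findClosestSumToZeroLoop]
    by_cases h1 : high - low = 1
    · rw [if_pos h1, if_neg (by omega)]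
    · rw [if_neg h1, if_neg (by omega : ¬ high - low = 0), if_pos (by omega : 1 < high - low)]
      have hmid : PySem.Int.floordiv (high + low) 2 = (high + low) / 2 :=
        PySem.Int.floordiv_eq_ediv_of_pos (by omega)
      simp only
      cases hg : PySem.List.pyGet? A (PySem.Int.floordiv (high + low) 2) with
      | none => rfl
      | some am =>
        dsimp only
        by_cases he : am = -1 * k
        · rw [if_pos he, if_pos (by omega : am = -k)]
        · rw [if_neg he, if_neg (by omega : ¬ am = -k)]
          by_cases hlt : am < -1 * k
          · rw [if_pos hlt, if_pos (by omega : am < -k)]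
            exact ih A _ high k (by omega) (by omega)
          · rw [if_neg hlt, if_neg (by omega : ¬ am < -k)]
            exact ih A low _ k (by omega) (by omega)

-- ===== VERDICT (by name: the statement is the Claim_ definition above) =====
theorem findClosestSumToZero_spec : Claim_equal_findClosestSumToZero := by
  intro A low high k _ hpre
  obtain ⟨hlh, hlo, hhi⟩ := hpre
  unfold Spec_findClosestSumToZero findClosestSumToZero findClosestSumToZero_alt
  by_cases h00 : high - low = 0
  · rw [if_pos h00, findClosestSumToZeroGo]
    rw [if_neg (by omega), if_pos h00]
  · rw [if_neg h00]
    have hfuel : (high - low).natAbs + 1 = (high - low).toNat + 1 := by omega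
    rw [hfuel]
    exact go_eq_loop _ A low high k (by omega) (by omega)
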